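-- pv_equiv track=rewrite | github.com/Incertam7/Infosys-InfyTQ | Programming-Fundamentals-using-Python/Day-4/Exercises/Exercise-22.py | generate_ticket
-- ===== SOURCE A (Python) =====
-- def generate_ticket(airline, source, destination, no_of_passengers):
--     ticket_number_list = []
--     #Write your logic here
--     ticket_number = airline + ":" + source[0:3] + ":" + destination [0:3]
--
--     if no_of_passengers < 5:
--         start_ticket = 101
--         for i in range(0, no_of_passengers):
--             ticket_number_list.append(ticket_number + ":" + str(start_ticket))
--             start_ticket += 1
--
--     else:
--         start_ticket = 101 + (no_of_passengers - 5)
--         for i in range(0, 5):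
--             ticket_number_list.append(ticket_number + ":" + str(start_ticket))
--             start_ticket += 1
--
--     #Use the below return statement wherever applicable
--     return ticket_number_list
-- ===== SOURCE B (Python) =====
-- def generate_ticket(airline, source, destination, no_of_passengers):
--     # Recursive, back-to-front: the LAST ticket number is always 100 + no_of_passengers
--     # (at most 5 tickets are issued, the latest ones), so build the list by recursion
--     # descending from the last number and prepending.
--     ticket_number = airline + ":" + source[0:3] + ":" + destination[0:3]
--
--     def build(last, remaining):
--         if remaining <= 0:
--             return []
--         return build(last - 1, remaining - 1) + [ticket_number + ":" + str(last)]
--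
--     return build(100 + no_of_passengers, min(no_of_passengers, 5))
-- ===== Notes on version B (the rewrite author's own statement) =====
-- stated objective: alternative
-- what changed: Replaces A's branch on n<5 with two forward accumulating loops by a branchless recursion that builds the list back-to-front, descending from the invariant last ticket number 100+n and prepending min(n,5) tickets.
import Mathlib
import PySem

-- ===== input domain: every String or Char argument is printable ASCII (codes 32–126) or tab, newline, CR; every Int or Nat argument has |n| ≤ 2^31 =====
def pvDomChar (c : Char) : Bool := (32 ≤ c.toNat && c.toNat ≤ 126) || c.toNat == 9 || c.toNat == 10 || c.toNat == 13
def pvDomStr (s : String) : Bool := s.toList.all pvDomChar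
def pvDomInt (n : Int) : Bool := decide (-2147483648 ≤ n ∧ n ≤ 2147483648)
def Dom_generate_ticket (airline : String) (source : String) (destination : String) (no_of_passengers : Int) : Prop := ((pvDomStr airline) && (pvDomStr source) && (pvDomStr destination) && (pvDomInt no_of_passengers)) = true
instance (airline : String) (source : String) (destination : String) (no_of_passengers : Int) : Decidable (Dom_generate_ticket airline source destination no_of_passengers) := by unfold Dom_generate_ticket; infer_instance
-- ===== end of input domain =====

-- B replaces A's branch with two forward accumulating loops by a branchless recursion that
-- builds the list back-to-front from the invariant last ticket number 100+n (objective: alternative).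

-- ===== PORT A =====
def generate_ticket (airline : String) (source : String) (destination : String) (no_of_passengers : Int) : List String :=
  let ticket_number := airline ++ ":" ++ PySem.Str.slice source (some 0) (some 3) ++ ":" ++ PySem.Str.slice destination (some 0) (some 3)
  if no_of_passengers < 5 then
    ((PySem.List.pyRange 0 no_of_passengers 1).foldl
      (fun (st : List String × Int) _ => (st.1 ++ [ticket_number ++ ":" ++ PySem.Int.toStr st.2], st.2 + 1))
      ([], 101)).1
  else
    ((PySem.List.pyRange 0 5 1).foldl
      (fun (st : List String × Int) _ => (st.1 ++ [ticket_number ++ ":" ++ PySem.Int.toStr st.2], st.2 + 1))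
      ([], 101 + (no_of_passengers - 5))).1

-- ===== PORT B =====
-- B's inner recursive helper 'build': prepend tickets descending from 'last'.
def pvBuild (tn : String) (last : Int) (remaining : Int) : List String :=
  if remaining ≤ 0 then []
  else pvBuild tn (last - 1) (remaining - 1) ++ [tn ++ ":" ++ PySem.Int.toStr last]
termination_by remaining.toNat
decreasing_by omega

def generate_ticket_alt (airline : String) (source : String) (destination : String) (no_of_passengers : Int) : List String :=
  let ticket_number := airline ++ ":" ++ PySem.Str.slice source (some 0) (some 3) ++ ":" ++ PySem.Str.slice destination (some 0) (some 3)
  pvBuild ticket_number (100 + no_of_passengers) (min no_of_passengers 5)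

-- ===== PRECONDITION & SPEC =====
def Spec_generate_ticket (airline : String) (source : String) (destination : String) (no_of_passengers : Int) (out : List String) : Prop := out = generate_ticket_alt airline source destination no_of_passengers
instance (airline : String) (source : String) (destination : String) (no_of_passengers : Int) (out : List String) : Decidable (Spec_generate_ticket airline source destination no_of_passengers out) := by unfold Spec_generate_ticket; infer_instance

-- ===== CLAIM (what is proved, stated in full; the proofs are below) =====
def Claim_equal_generate_ticket : Prop := ∀ (airline : String) (source : String) (destination : String) (no_of_passengers : Int), Dom_generate_ticket airline source destination no_of_passengers → Spec_generate_ticket airline source destination no_of_passengers (generate_ticket airline source destination no_of_passengers)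

-- ===== LEMMAS AND PROOFS =====

-- A's loop on range n, started at (acc, start): full-state characterisation.
theorem foldl_ticket_loop (f : Int → String) (n : ℕ) (acc : List String) (start : Int) :
    (List.range n).foldl (fun (st : List String × Int) _ => (st.1 ++ [f st.2], st.2 + 1)) (acc, start)
      = (acc ++ (List.range n).map (fun (k : ℕ) => f (start + (k : ℤ))), start + (n : ℤ)) := by
  induction n generalizing acc start with
  | zero => simp
  | succ m ih =>
      rw [List.range_succ, List.foldl_append, ih]
      simp [List.foldl, add_assoc]

-- B's recursion characterised: ascending map of length r.toNat ending at 'last'.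
theorem pvBuild_eq (tn : String) : ∀ (m : ℕ) (last r : Int), r.toNat = m →
    pvBuild tn last r = (List.range m).map (fun (k : ℕ) => tn ++ ":" ++ PySem.Int.toStr (last - (m : ℤ) + 1 + (k : ℤ))) := by
  intro m
  induction m with
  | zero =>
      intro last r h
      rw [pvBuild]
      simp only [if_pos (by omega : r ≤ 0)]
      simp
  | succ p ih =>
      intro last r h
      rw [pvBuild]
      rw [if_neg (by omega : ¬ r ≤ 0)]
      rw [ih (last - 1) (r - 1) (by omega)]
      rw [List.range_succ, List.map_append]
      congr 1
      · apply List.map_congr_left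
        intro k _
        congr 2
        omega
      · simp
        congr 1
        omega

theorem generate_ticket_eq_alt (airline source destination : String) (n : Int) :
    generate_ticket airline source destination n = generate_ticket_alt airline source destination n := by
  unfold generate_ticket generate_ticket_alt
  simp only [PySem.List.pyRange_one, List.foldl_map]
  set tn := airline ++ ":" ++ PySem.Str.slice source (some 0) (some 3) ++ ":" ++ PySem.Str.slice destination (some 0) (some 3) with htn
  rw [pvBuild_eq tn (min n 5).toNat (100 + n) (min n 5) rfl]
  by_cases h : n < 5
  · simp only [if_pos h]
    rw [foldl_ticket_loop (fun v => tn ++ ":" ++ PySem.Int.toStr v)]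
    have hm2 : (min n 5).toNat = n.toNat := by omega
    have h0 : (n - 0).toNat = n.toNat := by omega
    simp only [hm2, h0, List.nil_append]
    apply List.map_congr_left
    intro k hk
    have hk' := List.mem_range.mp hk
    congr 2
    omega
  · simp only [if_neg h]
    rw [foldl_ticket_loop (fun v => tn ++ ":" ++ PySem.Int.toStr v)]
    have hm2 : (min n 5).toNat = 5 := by omega
    simp only [hm2, List.nil_append, show ((5:ℤ) - 0).toNat = 5 from rfl]
    apply List.map_congr_left
    intro k _
    congr 2
    omega

-- ===== VERDICT (by name: the statement is the Claim_ definition above) =====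
theorem generate_ticket_spec : Claim_equal_generate_ticket := by
  intro airline source destination n _
  exact generate_ticket_eq_alt airline source destination n
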